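-- pv_equiv track=rewrite | github.com/Disfavour/PythonIntro2020 | 14.5.py | minus
-- ===== SOURCE A (Python) =====
-- def minus(d1, d2):
--     d = {}
--     dlina = max(max(d1), max(d2))
--     for i in range(dlina + 1):
--         if i in d1 and i in d2:
--             if d1[i] - d2[i] != 0:
--                 d[i] = d1[i] - d2[i]
--             else:
--                 pass
--         elif i in d1:
--             d[i] = d1[i]
--         elif i in d2:
--             d[i] = -d2[i]
--     return d
-- ===== SOURCE B (Python) =====
-- def minus(d1, d2):
--     # Like A, only nonnegative keys contribute (A scans range(0, max_key + 1));
--     # B visits just the present nonnegative keys in sorted order.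
--     d = {}
--     for k in sorted(k for k in set(d1) | set(d2) if k >= 0):
--         a = d1.get(k)
--         b = d2.get(k)
--         if a is None:
--             d[k] = -b
--         elif b is None:
--             d[k] = a
--         elif a != b:
--             d[k] = a - b
--     return d
-- ===== Notes on version B (the rewrite author's own statement) =====
-- stated objective: alternative
-- what changed: B iterates the sorted nonnegative keys actually present in either dict instead of A's scan of every integer from 0 to the maximum key, and branches on the two get() results per key instead of repeated membership tests plus indexing.
import Mathlib
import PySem

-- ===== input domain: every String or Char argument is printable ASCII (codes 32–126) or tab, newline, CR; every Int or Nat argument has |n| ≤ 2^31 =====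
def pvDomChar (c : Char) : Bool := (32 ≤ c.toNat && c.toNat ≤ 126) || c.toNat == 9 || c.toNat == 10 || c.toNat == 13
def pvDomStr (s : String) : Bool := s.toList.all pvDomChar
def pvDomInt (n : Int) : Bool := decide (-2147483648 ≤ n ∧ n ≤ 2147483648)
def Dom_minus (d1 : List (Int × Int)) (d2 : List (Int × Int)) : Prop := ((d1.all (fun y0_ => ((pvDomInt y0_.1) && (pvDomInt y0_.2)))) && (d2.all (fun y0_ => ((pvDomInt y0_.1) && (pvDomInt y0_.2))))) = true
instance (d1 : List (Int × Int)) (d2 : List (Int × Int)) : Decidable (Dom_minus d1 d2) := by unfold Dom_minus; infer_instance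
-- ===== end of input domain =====

-- B scans the sorted present nonnegative keys instead of A's scan of every integer in
-- range(0, max_key+1) (objective: alternative; like A, negative keys never contribute).

-- ===== PORT A =====
def minus (d1 : List (Int × Int)) (d2 : List (Int × Int)) : List (Int × Int) :=
  let D1 : PySem.Dict Int Int := PySem.Dict.ofList d1
  let D2 : PySem.Dict Int Int := PySem.Dict.ofList d2
  -- max(d1) / max(d2) iterate the dicts' keys; max([]) raises ValueError → none, excluded by Pre_minus
  match PySem.List.max? D1.keys (fun k => k), PySem.List.max? D2.keys (fun k => k) with
  | some m1, some m2 =>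
      let dlina : Int := max m1 m2
      ((PySem.List.pyRange 0 (dlina + 1) 1).foldl
        (fun d i =>
          if D1.contains i && D2.contains i then
            if D1.getD i 0 - D2.getD i 0 ≠ 0 then d.insert i (D1.getD i 0 - D2.getD i 0)
            else d
          else if D1.contains i then d.insert i (D1.getD i 0)
          else if D2.contains i then d.insert i (-(D2.getD i 0))
          else d)
        PySem.Dict.empty).items
  | _, _ => []   -- unreachable under Pre_minus (max() on an empty dict raises ValueError)

-- ===== PORT B =====
def minus_alt (d1 : List (Int × Int)) (d2 : List (Int × Int)) : List (Int × Int) :=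
  let D1 : PySem.Dict Int Int := PySem.Dict.ofList d1
  let D2 : PySem.Dict Int Int := PySem.Dict.ofList d2
  -- sorted(k for k in set(d1) | set(d2) if k >= 0): filter then sort (order-independent, exact for a set)
  let ks : List Int :=
    PySem.List.sorted
      (((PySem.Set.ofList D1.keys).union D2.keys).filter (fun k => decide (0 ≤ k)))
      (fun k => k)
  (ks.foldl
    (fun d k =>
      match D1.get? k, D2.get? k with
      | none,   some b => d.insert k (-b)
      | some a, none   => d.insert k a
      | some a, some b => if a ≠ b then d.insert k (a - b) else d
      | none,   none   => d)   -- unreachable: k is a key of D1 or D2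
    PySem.Dict.empty).items

-- ===== PRECONDITION & SPEC =====
-- Pre_minus excludes empty dicts only: there max() raises ValueError in A.
def Pre_minus (d1 : List (Int × Int)) (d2 : List (Int × Int)) : Prop := d1 ≠ [] ∧ d2 ≠ []
instance (d1 : List (Int × Int)) (d2 : List (Int × Int)) : Decidable (Pre_minus d1 d2) := by unfold Pre_minus; infer_instance

def pvWitness_minus : (List (Int × Int)) × (List (Int × Int)) := ([(0, 1), (3, 5)], [(1, 2), (3, 5)])

def Spec_minus (d1 : List (Int × Int)) (d2 : List (Int × Int)) (out : List (Int × Int)) : Prop := out = minus_alt d1 d2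
instance (d1 : List (Int × Int)) (d2 : List (Int × Int)) (out : List (Int × Int)) : Decidable (Spec_minus d1 d2 out) := by unfold Spec_minus; infer_instance

-- ===== CLAIM (what is proved, stated in full; the proofs are below) =====
def Claim_equal_minus : Prop := ∀ (d1 : List (Int × Int)) (d2 : List (Int × Int)), Dom_minus d1 d2 → Pre_minus d1 d2 → Spec_minus d1 d2 (minus d1 d2)

-- ===== LEMMAS AND PROOFS =====

-- the per-key difference both loops compute: none = no entry emitted for this key
def pvF (D1 D2 : PySem.Dict Int Int) (k : Int) : Option Int :=
  match D1.get? k, D2.get? k with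
  | none,   none   => none
  | some a, none   => some a
  | none,   some b => some (-b)
  | some a, some b => if a - b ≠ 0 then some (a - b) else none

lemma keys_ofList (l : List (Int × Int)) :
    (PySem.Dict.ofList l : PySem.Dict Int Int).keys = PySem.Set.ofList (l.map Prod.fst) := by
  show (List.foldl (fun acc p => acc.insert p.1 p.2) PySem.Dict.empty l).keys = _
  rw [PySem.Dict.keys_foldl_insert_key l Prod.fst (fun _ p => p.2) PySem.Dict.empty,
    PySem.Dict.keys_empty, PySem.Set.ofList_eq_foldl]
  rfl

lemma foldl_optInsert_items (f : Int → Option Int) :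
    ∀ (ks : List Int) (d : PySem.Dict Int Int), ks.Nodup → (∀ k ∈ ks, d.contains k = false) →
      (ks.foldl (fun d k => match f k with | some v => d.insert k v | none => d) d).items
        = d.items ++ ks.filterMap (fun k => (f k).map (fun v => (k, v))) := by
  intro ks
  induction ks with
  | nil => intro d _ _; simp
  | cons k t ih =>
    intro d hnd hfresh
    rw [List.foldl_cons]
    cases hf : f k with
    | none =>
      rw [List.filterMap_cons]
      simp only [hf]
      exact ih d hnd.of_cons (fun k' hk' => hfresh k' (List.mem_cons_of_mem _ hk'))
    | some v =>
      have hc : d.contains k = false := hfresh k List.mem_cons_self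
      have hfresh' : ∀ k' ∈ t, (d.insert k v).contains k' = false := by
        intro k' hk'
        rw [PySem.Dict.contains_insert]
        have hne : k' ≠ k := by
          intro he; exact (List.nodup_cons.mp hnd).1 (he ▸ hk')
        simp [hne, hfresh k' (List.mem_cons_of_mem _ hk')]
      rw [List.filterMap_cons]
      simp only [hf]
      rw [ih (d.insert k v) hnd.of_cons hfresh',
        PySem.Dict.items_insert_of_not_contains d v hc]
      simp

lemma filterMap_filter_of_none {p : Int → Bool} {F : Int → Option (Int × Int)}
    (l : List Int) (h : ∀ k, p k = false → F k = none) :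
    l.filterMap F = (l.filter p).filterMap F := by
  induction l with
  | nil => rfl
  | cons k t ih =>
    by_cases hp : p k
    · rw [List.filter_cons_of_pos hp, List.filterMap_cons, List.filterMap_cons, ih]
    · rw [List.filter_cons_of_neg (by simpa using hp), List.filterMap_cons,
        h k (by simpa using hp), ih]

theorem minus_spec : Claim_equal_minus := by
  intro d1 d2 _ hpre
  obtain ⟨h1, h2⟩ := hpre
  unfold Spec_minus minus minus_alt
  dsimp only
  have hk1 : (PySem.Dict.ofList d1 : PySem.Dict Int Int).keys ≠ [] := by
    rw [keys_ofList]
    cases d1 with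
    | nil => exact absurd rfl h1
    | cons p t =>
      intro he
      have hm : p.1 ∈ PySem.Set.ofList ((p :: t).map Prod.fst) := by
        rw [PySem.Set.mem_ofList]; simp
      rw [he] at hm
      exact (List.not_mem_nil) hm
  have hk2 : (PySem.Dict.ofList d2 : PySem.Dict Int Int).keys ≠ [] := by
    rw [keys_ofList]
    cases d2 with
    | nil => exact absurd rfl h2
    | cons p t =>
      intro he
      have hm : p.1 ∈ PySem.Set.ofList ((p :: t).map Prod.fst) := by
        rw [PySem.Set.mem_ofList]; simp
      rw [he] at hm
      exact (List.not_mem_nil) hm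
  set D1 : PySem.Dict Int Int := PySem.Dict.ofList d1 with hD1
  set D2 : PySem.Dict Int Int := PySem.Dict.ofList d2 with hD2
  cases hmax1 : PySem.List.max? D1.keys (fun k => k) with
  | none => exact absurd ((PySem.List.max?_eq_none_iff _ _).mp hmax1) hk1
  | some m1 =>
  cases hmax2 : PySem.List.max? D2.keys (fun k => k) with
  | none => exact absurd ((PySem.List.max?_eq_none_iff _ _).mp hmax2) hk2
  | some m2 =>
  -- the two loop bodies both compute pvF
  have hbodyA : (fun (d : PySem.Dict Int Int) (i : Int) =>
      if D1.contains i && D2.contains i then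
        if D1.getD i 0 - D2.getD i 0 ≠ 0 then d.insert i (D1.getD i 0 - D2.getD i 0)
        else d
      else if D1.contains i then d.insert i (D1.getD i 0)
      else if D2.contains i then d.insert i (-(D2.getD i 0))
      else d)
      = (fun d k => match pvF D1 D2 k with | some v => d.insert k v | none => d) := by
    funext d i
    simp only [pvF, PySem.Dict.contains_eq_isSome_get?, PySem.Dict.getD_eq_get?_getD]
    cases D1.get? i with
    | none => cases D2.get? i <;> simp
    | some a =>
      cases D2.get? i with
      | none => simp
      | some b =>
        by_cases hab : a - b ≠ 0 <;> simp [hab]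
  have hbodyB : (fun (d : PySem.Dict Int Int) (k : Int) =>
      match D1.get? k, D2.get? k with
      | none,   some b => d.insert k (-b)
      | some a, none   => d.insert k a
      | some a, some b => if a ≠ b then d.insert k (a - b) else d
      | none,   none   => d)
      = (fun d k => match pvF D1 D2 k with | some v => d.insert k v | none => d) := by
    funext d k
    simp only [pvF]
    cases D1.get? k with
    | none => cases D2.get? k <;> simp
    | some a =>
      cases D2.get? k with
      | none => simp
      | some b =>
        have : (a ≠ b) ↔ (a - b ≠ 0) := by constructor <;> intro h <;> omega
        by_cases hab : a - b ≠ 0 <;> simp [hab, this]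
  rw [hbodyA, hbodyB]
  dsimp only
  set U : PySem.Set Int := (PySem.Set.ofList D1.keys).union D2.keys with hU
  have hUnd : U.Nodup := PySem.Set.nodup_union _ _ (PySem.Set.nodup_ofList _)
  have hmemU : ∀ x, x ∈ U ↔ (x ∈ D1.keys ∨ x ∈ D2.keys) := by
    intro x
    rw [hU, PySem.Set.mem_union, PySem.Set.mem_ofList]
  set P : List Int := U.filter (fun k => decide (0 ≤ k)) with hP
  have hPnd : P.Nodup := hUnd.filter _
  set ks : List Int := PySem.List.sorted P (fun k => k) with hks
  have hksnd : ks.Nodup := ((PySem.List.sorted_perm P (fun k => k) false).nodup_iff).mpr hPnd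
  set R : List Int := PySem.List.pyRange 0 (max m1 m2 + 1) 1 with hR
  have hRnd : R.Nodup := by rw [hR]; exact PySem.List.nodup_pyRange_one _ _
  have hRpw : R.Pairwise (· < ·) := by rw [hR]; exact PySem.List.pairwise_lt_pyRange_one _ _
  rw [foldl_optInsert_items _ R PySem.Dict.empty hRnd
      (fun k _ => PySem.Dict.contains_empty k),
    foldl_optInsert_items _ ks PySem.Dict.empty hksnd (fun k _ => PySem.Dict.contains_empty k)]
  -- both are filterMaps now; reduce to the key lists
  have hFnone : ∀ k, (decide (k ∈ U) = false) →
      ((pvF D1 D2 k).map (fun v => (k, v)) : Option (Int × Int)) = none := by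
    intro k hk
    have hk' : k ∉ U := by simpa using hk
    rw [hmemU] at hk'
    push Not at hk'
    have n1 : D1.get? k = none := (PySem.Dict.get?_eq_none_iff_not_mem_keys _ _).mpr hk'.1
    have n2 : D2.get? k = none := (PySem.Dict.get?_eq_none_iff_not_mem_keys _ _).mpr hk'.2
    simp [pvF, n1, n2]
  rw [filterMap_filter_of_none R hFnone, filterMap_filter_of_none ks hFnone]
  have hksfilter : ks.filter (fun k => decide (k ∈ U)) = ks := by
    apply List.filter_eq_self.mpr
    intro k hk
    rw [hks, PySem.List.mem_sorted, hP, List.mem_filter] at hk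
    simpa using hk.1
  rw [hksfilter]
  have hbound : ∀ x ∈ U, 0 ≤ x → x < max m1 m2 + 1 := by
    intro x hx h0
    rw [hmemU] at hx
    have : x ≤ m1 ∨ x ≤ m2 := by
      rcases hx with hx | hx
      · exact Or.inl (PySem.List.max?_isMax hmax1 x hx)
      · exact Or.inr (PySem.List.max?_isMax hmax2 x hx)
    rcases this with h | h
    · calc x ≤ m1 := h
        _ ≤ max m1 m2 := le_max_left _ _
        _ < max m1 m2 + 1 := by omega
    · calc x ≤ m2 := h
        _ ≤ max m1 m2 := le_max_right _ _
        _ < max m1 m2 + 1 := by omega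
  have hmain : R.filter (fun k => decide (k ∈ U)) = ks := by
    rw [hks]
    apply Eq.symm
    apply PySem.List.sorted_eq_of_perm_of_pairwise_lt
    · rw [List.perm_ext_iff_of_nodup (hRnd.filter _) hPnd]
      intro x
      rw [List.mem_filter, List.mem_filter, hR, PySem.List.mem_pyRange_one]
      constructor
      · rintro ⟨⟨h0, _⟩, hu⟩
        exact ⟨by simpa using hu, by simpa using h0⟩
      · rintro ⟨hu, h0⟩
        have h0' : (0 : Int) ≤ x := by simpa using h0
        exact ⟨⟨h0', hbound x hu h0'⟩, by simpa using hu⟩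
    · exact hRpw.filter _
  rw [hmain]
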